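-- pv_equiv track=rewrite | github.com/sn8k/FNF-Python | src/chart_compat.py | _slugify_export_name
-- ===== SOURCE A (Python) =====
-- from typing import Any
--
-- def _slugify_export_name(value: Any) -> str:
--     raw = str(value or "imported_chart").strip().lower()
--     characters = []
--     previous_was_separator = False
--
--     for char in raw:
--         if char.isalnum():
--             characters.append(char)
--             previous_was_separator = False
--         elif not previous_was_separator:
--             characters.append("_")
--             previous_was_separator = True
--
--     slug = "".join(characters).strip("_")
--     return slug or "imported_chart"
-- ===== SOURCE B (Python) =====
-- from typing import Any
--
-- def _slugify_export_name(value: Any) -> str: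
--     raw = str(value or "imported_chart").strip().lower()
--     cleaned = "".join(c if c.isalnum() else " " for c in raw)
--     return "_".join(cleaned.split()) or "imported_chart"
-- ===== Notes on version B (the rewrite author's own statement) =====
-- stated objective: simpler
-- what changed: Replaces the character-by-character previous_was_separator state machine plus the final underscore strip by mapping non-alphanumerics to spaces and joining the whitespace-split words with underscores, letting split collapse and trim separator runs.
import Mathlib
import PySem

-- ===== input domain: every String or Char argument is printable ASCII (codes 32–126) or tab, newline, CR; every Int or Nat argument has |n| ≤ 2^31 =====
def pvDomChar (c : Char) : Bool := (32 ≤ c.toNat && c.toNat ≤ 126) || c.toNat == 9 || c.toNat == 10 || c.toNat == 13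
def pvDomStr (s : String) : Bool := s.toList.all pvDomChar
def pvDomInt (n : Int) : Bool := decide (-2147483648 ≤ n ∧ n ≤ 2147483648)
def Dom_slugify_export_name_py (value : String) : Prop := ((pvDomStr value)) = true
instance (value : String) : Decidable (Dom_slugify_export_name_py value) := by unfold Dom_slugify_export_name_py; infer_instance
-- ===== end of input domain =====

-- B replaces A's previous_was_separator state machine and final strip('_') by mapping
-- non-alphanumerics to spaces and returning '_'.join(cleaned.split()) — simpler, same values.

-- ===== PORT A =====

-- A's for-loop over raw: emit alnum chars, emit one '_' per run of non-alnum chars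
-- (the Bool is previous_was_separator).
def slugAGo : List Char → Bool → List Char
  | [], _ => []
  | c :: rest, prev =>
    if PySem.Chars.isalnum c then c :: slugAGo rest false
    else if prev then slugAGo rest prev
    else '_' :: slugAGo rest true

def slugify_export_name_py (value : String) : String :=
  let raw := PySem.Chars.lower (PySem.Chars.strip (if value = "" then "imported_chart" else value).toList)
  let characters := slugAGo raw false
  let slug := PySem.Chars.stripChars characters ['_']
  if slug.isEmpty then "imported_chart" else String.ofList slug

-- ===== PORT B =====
def slugify_export_name_py_alt (value : String) : String :=
  let raw := PySem.Chars.lower (PySem.Chars.strip (if value = "" then "imported_chart" else value).toList)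
  let cleaned := raw.map (fun c => if PySem.Chars.isalnum c then c else ' ')
  let slug := PySem.Chars.join ['_'] (PySem.Chars.split₀ cleaned)
  if slug.isEmpty then "imported_chart" else String.ofList slug

-- ===== PRECONDITION & SPEC =====
def Spec_slugify_export_name_py (value : String) (out : String) : Prop := out = slugify_export_name_py_alt value
instance (value : String) (out : String) : Decidable (Spec_slugify_export_name_py value out) := by unfold Spec_slugify_export_name_py; infer_instance

-- ===== CLAIM (what is proved, stated in full; the proofs are below) =====
def Claim_equal_slugify_export_name_py : Prop := ∀ (value : String), Dom_slugify_export_name_py value → Spec_slugify_export_name_py value (slugify_export_name_py value)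

-- ===== LEMMAS AND PROOFS =====

-- The maximal alnum runs ("words") of a char list.
def slugWords (cs : List Char) : List (List Char) :=
  match cs with
  | [] => []
  | c :: rest =>
    if PySem.Chars.isalnum c then
      (c :: rest.takeWhile PySem.Chars.isalnum) :: slugWords (rest.dropWhile PySem.Chars.isalnum)
    else slugWords rest
termination_by cs.length
decreasing_by
  · simpa using Nat.lt_succ_of_le (List.length_dropWhile_le _ _)
  · simp

theorem slugWords_cons_alnum (c : Char) (rest : List Char) (h : PySem.Chars.isalnum c = true) :
    slugWords (c :: rest) =
      (c :: rest.takeWhile PySem.Chars.isalnum) :: slugWords (rest.dropWhile PySem.Chars.isalnum) := by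
  rw [slugWords]; simp [h]

theorem slugWords_cons_not (c : Char) (rest : List Char) (h : PySem.Chars.isalnum c = false) :
    slugWords (c :: rest) = slugWords rest := by
  rw [slugWords]; simp [h]

theorem slugWords_ne_nil (cs : List Char) : ∀ w ∈ slugWords cs, w ≠ [] := by
  induction cs using slugWords.induct with
  | case1 => simp [slugWords]
  | case2 c rest h ih => rw [slugWords_cons_alnum c rest h]; simpa using ih
  | case3 c rest h ih => rw [slugWords_cons_not c rest (by simpa using h)]; exact ih

theorem slugWords_alnum (cs : List Char) :
    ∀ w ∈ slugWords cs, ∀ c ∈ w, PySem.Chars.isalnum c = true := by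
  induction cs using slugWords.induct with
  | case1 => simp [slugWords]
  | case2 c rest h ih =>
    rw [slugWords_cons_alnum c rest h]
    intro w hw
    rcases List.mem_cons.mp hw with hw | hw
    · subst hw
      intro d hd
      rcases List.mem_cons.mp hd with hd | hd
      · exact hd ▸ h
      · exact List.mem_takeWhile_imp hd
    · exact ih w hw
  | case3 c rest h ih => rw [slugWords_cons_not c rest (by simpa using h)]; exact ih

theorem char_le_toNat {a b : Char} (h : a ≤ b) : a.toNat ≤ b.toNat :=
  UInt32.le_iff_toNat_le.mp (Char.le_def.mp h)

theorem alnum_bounds (c : Char) (h : PySem.Chars.isalnum c = true) :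
    48 ≤ c.toNat ∧ c.toNat ≤ 57 ∨ 65 ≤ c.toNat ∧ c.toNat ≤ 90 ∨ 97 ≤ c.toNat ∧ c.toNat ≤ 122 := by
  simp only [PySem.Chars.isalnum, PySem.Chars.isalpha, PySem.Chars.isupper, PySem.Chars.islower,
    PySem.Chars.isdigit, Bool.or_eq_true, Bool.and_eq_true, decide_eq_true_eq] at h
  rcases h with (⟨h1, h2⟩ | ⟨h1, h2⟩) | ⟨h1, h2⟩ <;>
    first
      | exact Or.inr (Or.inl ⟨char_le_toNat h1, char_le_toNat h2⟩)
      | exact Or.inr (Or.inr ⟨char_le_toNat h1, char_le_toNat h2⟩)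
      | exact Or.inl ⟨char_le_toNat h1, char_le_toNat h2⟩

theorem isspace_of_alnum (c : Char) (h : PySem.Chars.isalnum c = true) :
    PySem.Chars.isspace c = false := by
  have hb := alnum_bounds c h
  simp only [PySem.Chars.isspace, Bool.or_eq_false_iff, Bool.and_eq_false_iff,
    decide_eq_false_iff_not]
  omega

theorem alnum_ne_underscore (c : Char) (h : PySem.Chars.isalnum c = true) : ¬ c = '_' := by
  intro e; subst e; exact absurd h (by decide)

-- split₀ on the cleaned list computes exactly the alnum words, generalized over go's state.
theorem split₀_go_cleaned (cs cur : List Char) (acc : List (List Char)) :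
    PySem.Chars.split₀.go (cs.map (fun c => if PySem.Chars.isalnum c then c else ' ')) cur acc =
      acc.reverse ++
        (if cur = [] then slugWords cs
         else (cur.reverse ++ cs.takeWhile PySem.Chars.isalnum) ::
           slugWords (cs.dropWhile PySem.Chars.isalnum)) := by
  induction cs generalizing cur acc with
  | nil =>
    cases cur with
    | nil => simp [PySem.Chars.split₀.go, slugWords]
    | cons a as => simp [PySem.Chars.split₀.go, slugWords]
  | cons c rest ih =>
    by_cases h : PySem.Chars.isalnum c = true
    · have hs : PySem.Chars.isspace c = false := isspace_of_alnum c h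
      have hf : (if PySem.Chars.isalnum c = true then c else ' ') = c := by rw [if_pos h]
      rw [List.map_cons, hf, PySem.Chars.split₀.go, if_neg (by simp [hs]), ih (c :: cur) acc]
      cases cur with
      | nil => simp [slugWords_cons_alnum c rest h]
      | cons a as => simp [h]
    · have h' : PySem.Chars.isalnum c = false := by simpa using h
      have hf : (if PySem.Chars.isalnum c = true then c else ' ') = ' ' := by rw [h']; simp
      rw [List.map_cons, hf, PySem.Chars.split₀.go, if_pos (by decide)]
      cases cur with
      | nil => simp [ih [] acc, slugWords_cons_not c rest h']
      | cons a as =>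
        rw [if_neg (by simp), ih [] ((a :: as).reverse :: acc)]
        simp [slugWords_cons_not c rest h', h']

theorem split₀_cleaned (cs : List Char) :
    PySem.Chars.split₀ (cs.map (fun c => if PySem.Chars.isalnum c then c else ' ')) = slugWords cs := by
  rw [PySem.Chars.split₀, split₀_go_cleaned]; simp

-- What A's loop emits once a separator has already been written (prev = true).
def slugRep (cs : List Char) : List Char :=
  match cs with
  | [] => []
  | c :: rest =>
    if PySem.Chars.isalnum c then
      c :: rest.takeWhile PySem.Chars.isalnum ++
        (if rest.dropWhile PySem.Chars.isalnum = [] then []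
         else '_' :: slugRep (rest.dropWhile PySem.Chars.isalnum))
    else slugRep rest
termination_by cs.length
decreasing_by
  · simpa using Nat.lt_succ_of_le (List.length_dropWhile_le _ _)
  · simp

theorem slugRep_cons_alnum (c : Char) (rest : List Char) (h : PySem.Chars.isalnum c = true) :
    slugRep (c :: rest) =
      c :: rest.takeWhile PySem.Chars.isalnum ++
        (if rest.dropWhile PySem.Chars.isalnum = [] then []
         else '_' :: slugRep (rest.dropWhile PySem.Chars.isalnum)) := by
  rw [slugRep]; simp [h]

theorem slugRep_cons_not (c : Char) (rest : List Char) (h : PySem.Chars.isalnum c = false) :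
    slugRep (c :: rest) = slugRep rest := by
  rw [slugRep]; simp [h]

-- A's loop, characterized in both states.
theorem slugAGo_char (cs : List Char) :
    slugAGo cs true = slugRep cs ∧
    slugAGo cs false =
      cs.takeWhile PySem.Chars.isalnum ++
        (if cs.dropWhile PySem.Chars.isalnum = [] then []
         else '_' :: slugRep (cs.dropWhile PySem.Chars.isalnum)) := by
  induction cs with
  | nil => simp [slugAGo, slugRep]
  | cons c rest ih =>
    by_cases h : PySem.Chars.isalnum c = true
    · constructor
      · rw [slugAGo, if_pos h, slugRep_cons_alnum c rest h, ih.2]; simp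
      · rw [slugAGo, if_pos h, List.takeWhile_cons_of_pos h, List.dropWhile_cons_of_pos h, ih.2]
        simp
    · have h' : PySem.Chars.isalnum c = false := by simpa using h
      constructor
      · rw [slugAGo, if_neg (by simp [h']), if_pos rfl, slugRep_cons_not c rest h', ih.1]
      · rw [slugAGo, if_neg (by simp [h']), if_neg (by simp),
          List.takeWhile_cons_of_neg (by simp [h']), List.dropWhile_cons_of_neg (by simp [h'])]
        simp [slugRep_cons_not c rest h', ih.1]

-- slugRep is empty or starts with an alphanumeric character (never '_').
theorem slugRep_head (cs : List Char) :
    slugRep cs = [] ∨ ∃ c rest, slugRep cs = c :: rest ∧ PySem.Chars.isalnum c = true := by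
  induction cs using slugRep.induct with
  | case1 => left; simp [slugRep]
  | case2 c rest h ih => right; exact ⟨c, _, slugRep_cons_alnum c rest h, h⟩
  | case3 c rest h ih => rw [slugRep_cons_not c rest (by simpa using h)]; exact ih

-- remove trailing underscores
def rstripU (cs : List Char) : List Char :=
  (cs.reverse.dropWhile (fun c => ['_'].contains c)).reverse

theorem rstripU_append (a b : List Char) :
    rstripU (a ++ b) = if rstripU b = [] then rstripU a else a ++ rstripU b := by
  by_cases h : rstripU b = []
  · have hb : (b.reverse.dropWhile (fun c => ['_'].contains c)).isEmpty = true := by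
      rw [List.isEmpty_iff]
      simpa [rstripU] using congrArg List.reverse h
    rw [if_pos h, rstripU, List.reverse_append, List.dropWhile_append, if_pos hb]
    rfl
  · have hb : ¬ ((b.reverse.dropWhile (fun c => ['_'].contains c)).isEmpty = true) :=
      fun hc => h (by rw [rstripU, List.isEmpty_iff.mp hc, List.reverse_nil])
    rw [if_neg h, rstripU, List.reverse_append, List.dropWhile_append, if_neg hb,
      List.reverse_append, List.reverse_reverse]
    rfl

theorem rstripU_word (w : List Char) (hw : w ≠ []) (h : ∀ c ∈ w, PySem.Chars.isalnum c = true) :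
    rstripU w = w := by
  rcases List.eq_nil_or_concat w with rfl | ⟨a, c, rfl⟩
  · exact absurd rfl hw
  · have hc : ¬ c = '_' := alnum_ne_underscore c (h c (by simp))
    simp [rstripU, hc]

-- '_'.join, one step at a time.
theorem joinU_cons (w : List Char) (ws : List (List Char)) :
    PySem.Chars.join ['_'] (w :: ws) =
      w ++ (if ws = [] then [] else '_' :: PySem.Chars.join ['_'] ws) := by
  cases ws with
  | nil => simp [PySem.Chars.join, List.intercalate]
  | cons w2 ws' => simp [PySem.Chars.join, List.intercalate, List.intersperse]

theorem joinU_eq_nil_iff (ws : List (List Char)) (hne : ∀ w ∈ ws, w ≠ []) :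
    PySem.Chars.join ['_'] ws = [] ↔ ws = [] := by
  cases ws with
  | nil => simp [PySem.Chars.join, List.intercalate]
  | cons w ws' =>
    rw [joinU_cons]
    constructor
    · intro h
      have hw : w = [] := by
        rcases List.append_eq_nil_iff.mp h with ⟨h1, _⟩
        exact h1
      exact absurd hw (hne w (by simp))
    · intro h; exact absurd h (by simp)

-- rstripping A's prev=true output yields the words joined by single underscores.
theorem rstripU_slugRep (cs : List Char) :
    rstripU (slugRep cs) = PySem.Chars.join ['_'] (slugWords cs) := by
  induction cs using slugRep.induct with
  | case1 => simp [slugRep, slugWords, rstripU, PySem.Chars.join, List.intercalate]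
  | case2 c rest h ih =>
    rw [slugRep_cons_alnum c rest h, slugWords_cons_alnum c rest h]
    have hwal : ∀ d ∈ c :: rest.takeWhile PySem.Chars.isalnum, PySem.Chars.isalnum d = true := by
      have hall := slugWords_alnum (c :: rest)
      rw [slugWords_cons_alnum c rest h] at hall
      exact hall _ (List.mem_cons.mpr (Or.inl rfl))
    have hwr : rstripU (c :: rest.takeWhile PySem.Chars.isalnum) = c :: rest.takeWhile PySem.Chars.isalnum :=
      rstripU_word _ (by simp) hwal
    have h1 : slugWords ([] : List Char) = [] := by rw [slugWords]
    by_cases hd : rest.dropWhile PySem.Chars.isalnum = []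
    · rw [hd, if_pos rfl, List.append_nil, h1, joinU_cons, if_pos rfl, List.append_nil]
      exact hwr
    · rw [if_neg hd]
      have hstep : rstripU ('_' :: slugRep (rest.dropWhile PySem.Chars.isalnum)) =
          if rstripU (slugRep (rest.dropWhile PySem.Chars.isalnum)) = [] then []
          else '_' :: rstripU (slugRep (rest.dropWhile PySem.Chars.isalnum)) := by
      -- '_' :: x = ['_'] ++ x; rstripU ['_'] = []
        have happ := rstripU_append ['_'] (slugRep (rest.dropWhile PySem.Chars.isalnum))
        by_cases hz : rstripU (slugRep (rest.dropWhile PySem.Chars.isalnum)) = []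
        · simpa [hz] using happ
        · simpa [hz] using happ
      rw [rstripU_append, hstep, ih]
      by_cases hz : slugWords (rest.dropWhile PySem.Chars.isalnum) = []
      · simp [hz, hwr, PySem.Chars.join, List.intercalate]
      · have hne : PySem.Chars.join ['_'] (slugWords (rest.dropWhile PySem.Chars.isalnum)) ≠ [] :=
          fun hc => hz ((joinU_eq_nil_iff _ (slugWords_ne_nil _)).mp hc)
        simp [hne, hz, joinU_cons]
  | case3 c rest h ih =>
    rw [slugRep_cons_not c rest (by simpa using h),
      slugWords_cons_not c rest (by simpa using h)]
    exact ih

theorem lstripU_slugRep (cs : List Char) :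
    (slugRep cs).dropWhile (fun c => ['_'].contains c) = slugRep cs := by
  rcases slugRep_head cs with h | ⟨c, rest, h, hc⟩
  · simp [h]
  · rw [h, List.dropWhile_cons_of_neg (by simp [alnum_ne_underscore c hc])]

-- Main list-level equality: A's strip('_')-ed loop output equals '_'.join of the words.
theorem slug_main (cs : List Char) :
    PySem.Chars.stripChars (slugAGo cs false) ['_'] = PySem.Chars.join ['_'] (slugWords cs) := by
  cases cs with
  | nil => simp [slugAGo, slugWords, PySem.Chars.stripChars, PySem.Chars.join, List.intercalate]
  | cons c rest =>
    by_cases h : PySem.Chars.isalnum c = true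
    · have hA : slugAGo (c :: rest) false = slugRep (c :: rest) := by
        rw [(slugAGo_char (c :: rest)).2, slugRep_cons_alnum c rest h,
          List.takeWhile_cons_of_pos h, List.dropWhile_cons_of_pos h]
      rw [hA, PySem.Chars.stripChars]
      show rstripU ((slugRep (c :: rest)).dropWhile (fun x => ['_'].contains x)) = _
      rw [lstripU_slugRep, rstripU_slugRep]
    · have h' : PySem.Chars.isalnum c = false := by simpa using h
      have hA : slugAGo (c :: rest) false = '_' :: slugRep rest := by
        rw [slugAGo, if_neg (by simp [h']), if_neg (by simp), (slugAGo_char rest).1]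
      rw [hA, PySem.Chars.stripChars, slugWords_cons_not c rest h']
      show rstripU (('_' :: slugRep rest).dropWhile (fun x => ['_'].contains x)) = _
      rw [List.dropWhile_cons_of_pos (by simp), lstripU_slugRep, rstripU_slugRep]

-- ===== VERDICT (by name: the statement is the Claim_ definition above) =====
theorem slugify_export_name_py_spec : Claim_equal_slugify_export_name_py := by
  intro value _
  show slugify_export_name_py value = slugify_export_name_py_alt value
  simp only [slugify_export_name_py, slugify_export_name_py_alt, slug_main, split₀_cleaned]
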